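-- pv_equiv track=rewrite | github.com/SansPapyrus683/advent-of-code | y2018/python/day20.py | room_dists
-- ===== SOURCE A (Python) =====
-- def room_dists(re: str) -> dict[tuple[int, int], int]:
--     # sauce: https://todd.ginsberg.com/post/advent-of-code/2018/day20/
--     dir_dict = {
--         "N": lambda r, c: (r - 1, c),
--         "S": lambda r, c: (r + 1, c),
--         "E": lambda r, c: (r, c + 1),
--         "W": lambda r, c: (r, c - 1),
--     }
--     start = (0, 0)
--     dist = {start: 0}
--     stack = [start]
--     at = start
--     for i in re.upper():
--         if i in dir_dict:
--             prev = at
--             at = dir_dict[i](*at)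
--             dist[at] = min(dist.get(at, float("inf")), dist[prev] + 1)
--         elif i == "(":
--             stack.append(at)
--         elif i == ")":
--             at = stack.pop()
--         elif i == "|":
--             at = stack[-1]
--     return dist
-- ===== SOURCE B (Python) =====
-- def room_dists(re: str) -> dict[tuple[int, int], int]:
--     # Recursive-descent parse over the upper-cased string instead of an explicit stack.
--     s = re.upper()
--     offs = {"N": (-1, 0), "S": (1, 0), "E": (0, 1), "W": (0, -1)}
--     dist = {(0, 0): 0}
--
--     def parse(i: int, entry: tuple[int, int]) -> int:
--         pos = entry
--         while i < len(s):
--             c = s[i]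
--             i += 1
--             if c in offs:
--                 dr, dc = offs[c]
--                 nd = dist[pos] + 1
--                 pos = (pos[0] + dr, pos[1] + dc)
--                 old = dist.get(pos)
--                 dist[pos] = nd if old is None or nd < old else old
--             elif c == "(":
--                 i = parse(i, pos)
--             elif c == "|":
--                 pos = entry
--             elif c == ")":
--                 return i
--         return i
--
--     i = 0
--     while i < len(s):
--         i = parse(i, (0, 0))
--     return dist
-- ===== Notes on version B (the rewrite author's own statement) =====
-- stated objective: alternative
-- what changed: Replaces A's single linear scan with an explicit backtracking stack by a recursive-descent parser (parse(i, entry) consumes characters, recurses on '(', resets to the group-entry position on '|', returns on ')'), keeping the same dict of minimal room distances.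
import Mathlib
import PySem

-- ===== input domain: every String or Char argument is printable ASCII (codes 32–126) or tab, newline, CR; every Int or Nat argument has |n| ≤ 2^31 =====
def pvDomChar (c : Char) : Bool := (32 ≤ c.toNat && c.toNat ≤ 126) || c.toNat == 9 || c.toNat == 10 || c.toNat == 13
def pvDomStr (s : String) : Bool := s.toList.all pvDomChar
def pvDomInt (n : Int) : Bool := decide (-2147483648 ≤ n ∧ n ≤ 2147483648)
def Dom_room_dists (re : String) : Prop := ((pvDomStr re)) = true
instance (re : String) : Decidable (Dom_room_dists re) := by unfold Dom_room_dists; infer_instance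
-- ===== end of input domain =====

-- B replaces A's explicit stack with a recursive-descent parser over the character list (same dict of
-- minimal distances, same reset-to-group-entry behaviour); objective: alternative decomposition, not speed.

-- ===== PORT A =====
-- dir_dict: maps a direction char to the lambda applied to the current room (none = not a direction)
def dirA (c : Char) : Option ((Int × Int) → (Int × Int)) :=
  if c = 'N' then some (fun p => (p.1 - 1, p.2))
  else if c = 'S' then some (fun p => (p.1 + 1, p.2))
  else if c = 'E' then some (fun p => (p.1, p.2 + 1))
  else if c = 'W' then some (fun p => (p.1, p.2 - 1))
  else none

-- one iteration of A's for-loop; state = (dist, stack, at); none = a raised IndexError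
def stepA (st : Option (PySem.Dict (Int × Int) Int × List (Int × Int) × (Int × Int))) (c : Char) :
    Option (PySem.Dict (Int × Int) Int × List (Int × Int) × (Int × Int)) :=
  match st with
  | none => none
  | some (dist, stack, at_) =>
    match dirA c with
    | some f =>
      match dist.get? at_ with              -- dist[prev]
      | none => none
      | some dp =>
        let nxt := f at_
        let nd := match dist.get? nxt with  -- min(dist.get(at, float("inf")), dist[prev] + 1)
          | none => dp + 1
          | some v => min v (dp + 1)
        some (dist.insert nxt nd, stack, nxt)
    | none =>
      if c = '(' then some (dist, at_ :: stack, at_)        -- stack.append(at)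
      else if c = ')' then
        match stack with
        | [] => none                                        -- stack.pop() on empty: IndexError
        | top :: rest => some (dist, rest, top)
      else if c = '|' then
        match stack with
        | [] => none                                        -- stack[-1] on empty: IndexError
        | top :: rest => some (dist, top :: rest, top)
      else some (dist, stack, at_)

def room_dists (re : String) : List (Int × Int × Int) :=
  let start : Int × Int := (0, 0)
  match (PySem.Str.upper re).toList.foldl stepA
      (some (PySem.Dict.ofList [(start, (0 : Int))], [start], start)) with
  | some (dist, _, _) => dist.items.map (fun p => (p.1.1, p.1.2, p.2))
  | none => []   -- unreachable under Pre_room_dists (exactly where the Python raises)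

-- ===== PORT B =====
def offsB (c : Char) : Option (Int × Int) :=
  if c = 'N' then some (-1, 0)
  else if c = 'S' then some (1, 0)
  else if c = 'E' then some (0, 1)
  else if c = 'W' then some (0, -1)
  else none

-- parse(i, entry) of Source B: consumes characters, returns (remaining characters, dist).
-- The extra fuel argument is pure totality machinery (fuel = length of the list at the call site,
-- always sufficient: the parser consumes at least one character before any recursive call).
def parseB : Nat → List Char → PySem.Dict (Int × Int) Int → (Int × Int) → (Int × Int) →
    List Char × PySem.Dict (Int × Int) Int
  | 0, l, d, _, _ => (l, d)
  | _ + 1, [], d, _, _ => ([], d)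
  | fuel + 1, c :: rest, d, entry, pos =>
    match offsB c with
    | some (dr, dc) =>
      let nd := d.getD pos 0 + 1                 -- dist[pos] + 1 (pos is always a key of dist)
      let pos' := (pos.1 + dr, pos.2 + dc)
      let v := match d.get? pos' with            -- dist[pos] = nd if old is None or nd < old else old
        | none => nd
        | some old => if nd < old then nd else old
      parseB fuel rest (d.insert pos' v) entry pos'
    | none =>
      if c = '(' then
        let r1 := parseB fuel rest d pos pos     -- i = parse(i, pos)
        parseB fuel r1.1 r1.2 entry pos
      else if c = '|' then parseB fuel rest d entry entry    -- pos = entry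
      else if c = ')' then (rest, d)
      else parseB fuel rest d entry pos

-- the top-level while loop of Source B (fuel likewise = list length, always sufficient)
def topB : Nat → List Char → PySem.Dict (Int × Int) Int → PySem.Dict (Int × Int) Int
  | 0, _, d => d
  | _ + 1, [], d => d
  | fuel + 1, c :: rest, d =>
    let r := parseB (c :: rest).length (c :: rest) d (0, 0) (0, 0)
    topB fuel r.1 r.2

def room_dists_alt (re : String) : List (Int × Int × Int) :=
  (topB (PySem.Str.upper re).toList.length (PySem.Str.upper re).toList
      (PySem.Dict.ofList [(((0 : Int), (0 : Int)), (0 : Int))])).items.map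
    (fun p => (p.1.1, p.1.2, p.2))

-- ===== PRECONDITION & SPEC =====
-- Pre_ excludes exactly the inputs on which the Python A raises IndexError: a ')' (stack.pop) or '|'
-- (stack[-1]) occurring at a point where strictly more ')' than '(' have already been consumed.
def Pre_room_dists (re : String) : Prop :=
  ∀ i, (hi : i < (PySem.Str.upper re).toList.length) →
    ((PySem.Str.upper re).toList[i] = ')' ∨ (PySem.Str.upper re).toList[i] = '|') →
    ((PySem.Str.upper re).toList.take i).count ')' ≤ ((PySem.Str.upper re).toList.take i).count '('
instance (re : String) : Decidable (Pre_room_dists re) := by unfold Pre_room_dists; infer_instance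

def pvWitness_room_dists : String := "enww(NEEE|SSE(EE|N))S"

def Spec_room_dists (re : String) (out : List (Int × Int × Int)) : Prop := out = room_dists_alt re
instance (re : String) (out : List (Int × Int × Int)) : Decidable (Spec_room_dists re out) := by unfold Spec_room_dists; infer_instance

-- ===== CLAIM (what is proved, stated in full; the proofs are below) =====
def Claim_equal_room_dists : Prop := ∀ (re : String), Dom_room_dists re → Pre_room_dists re → Spec_room_dists re (room_dists re)

-- ===== LEMMAS AND PROOFS =====

-- every ')' or '|' of l sits at strictly positive paren depth
def StrictL (l : List Char) : Prop :=
  ∀ i, (hi : i < l.length) → (l[i] = ')' ∨ l[i] = '|') →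
    (l.take i).count ')' < (l.take i).count '('

-- the Pre_ condition on a bare character list
def PreL (l : List Char) : Prop :=
  ∀ i, (hi : i < l.length) → (l[i] = ')' ∨ l[i] = '|') →
    (l.take i).count ')' ≤ (l.take i).count '('

theorem strictL_shift {pre rest : List Char}
    (h : StrictL (pre ++ rest)) (hbal : pre.count ')' = pre.count '(') : StrictL rest := by
  intro i hi hc
  have h2 := h (pre.length + i) (by simp; omega)
    (by simpa [List.getElem_append_right] using hc)
  have ht : (pre ++ rest).take (pre.length + i) = pre ++ rest.take i := by
    simp [List.take_append]
  rw [ht] at h2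
  simp only [List.count_append] at h2
  omega

theorem strictL_of_preL {pre rest : List Char}
    (h : PreL (pre ++ rest)) (hbal : pre.count ')' = pre.count '(' + 1) : StrictL rest := by
  intro i hi hc
  have h2 := h (pre.length + i) (by simp; omega)
    (by simpa [List.getElem_append_right] using hc)
  have ht : (pre ++ rest).take (pre.length + i) = pre ++ rest.take i := by
    simp [List.take_append]
  rw [ht] at h2
  simp only [List.count_append] at h2
  omega

theorem strictL_cons {c : Char} {rest : List Char}
    (h : StrictL (c :: rest)) (h1 : c ≠ '(') (h2 : c ≠ ')') : StrictL rest := by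
  exact strictL_shift (pre := [c]) (rest := rest) h (by simp [h1, h2])

theorem dirA_none_iff (c : Char) : dirA c = none ↔ offsB c = none := by
  unfold dirA offsB
  split_ifs <;> simp

-- B's parser never gains characters
theorem parseB_len : ∀ (fuel : Nat) (l : List Char) (d : PySem.Dict (Int × Int) Int)
    (entry pos : Int × Int), l.length ≤ fuel → (parseB fuel l d entry pos).1.length ≤ l.tail.length := by
  intro fuel
  induction fuel with
  | zero =>
    intro l d e p h
    have hl : l = [] := by cases l <;> simp_all
    subst hl; simp [parseB]
  | succ f ih =>
    intro l d e p h
    match l with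
    | [] => simp [parseB]
    | c :: rest =>
      simp only [List.length_cons, Nat.add_le_add_iff_right] at h
      simp only [parseB, List.tail_cons]
      cases hoffs : offsB c with
      | some off =>
        obtain ⟨dr, dc⟩ := off
        exact le_trans (ih _ _ _ _ h) (by cases rest <;> simp)
      | none =>
        split_ifs with h1 h2 h3
        · have hr1 := ih rest d p p h
          have hl1 : (parseB f rest d p p).1.length ≤ f :=
            le_trans hr1 (le_trans (by cases rest <;> simp) h)
          exact le_trans (ih _ _ _ _ hl1) (le_trans (by cases (parseB f rest d p p).1 <;> simp)
            (le_trans hr1 (by cases rest <;> simp)))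
        · exact le_trans (ih _ _ _ _ h) (by cases rest <;> simp)
        · exact le_refl _
        · exact le_trans (ih _ _ _ _ h) (by cases rest <;> simp)

theorem parseB_nil (fuel : Nat) (d : PySem.Dict (Int × Int) Int) (entry pos : Int × Int) :
    parseB fuel [] d entry pos = ([], d) := by
  cases fuel <;> simp [parseB]

theorem topB_nil (fuel : Nat) (d : PySem.Dict (Int × Int) Int) : topB fuel [] d = d := by
  cases fuel <;> simp [topB]

theorem dirA_offsB {c : Char} {dr dc : Int} (h : offsB c = some (dr, dc)) :
    dirA c = some (fun p => (p.1 + dr, p.2 + dc)) := by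
  unfold dirA offsB at *
  split_ifs at * <;> simp_all <;> funext p <;> simp <;> (try constructor) <;> omega

theorem offsB_ne {c : Char} {x : Int × Int} (h : offsB c = some x) :
    c ≠ '(' ∧ c ≠ ')' ∧ c ≠ '|' := by
  unfold offsB at h
  split_ifs at h with h1 h2 h3 h4 <;> subst_vars <;> refine ⟨by decide, by decide, by decide⟩

-- the main simulation lemma: one parseB call corresponds to A's fold over the consumed prefix
theorem parseB_sim : ∀ (fuel : Nat) (l : List Char) (d : PySem.Dict (Int × Int) Int)
    (entry pos : Int × Int) (S : List (Int × Int)) (ph : Bool),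
    l.length ≤ fuel →
    (d.get? entry).isSome → (d.get? pos).isSome →
    (ph = true → StrictL l) →
    (∀ k, (d.get? k).isSome → (((parseB fuel l d entry pos).2).get? k).isSome) ∧
    (∃ pre, l = pre ++ (parseB fuel l d entry pos).1 ∧
      ((parseB fuel l d entry pos).1 ≠ [] → pre.count ')' = pre.count '(' + 1)) ∧
    ((parseB fuel l d entry pos).1 = [] →
      ∃ stk at', l.foldl stepA (some (d, (if ph then S else entry :: S), pos)) =
        some ((parseB fuel l d entry pos).2, stk, at')) ∧
    ((parseB fuel l d entry pos).1 ≠ [] → ph = false ∧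
      l.foldl stepA (some (d, (if ph then S else entry :: S), pos)) =
        (parseB fuel l d entry pos).1.foldl stepA (some ((parseB fuel l d entry pos).2, S, entry))) := by
  intro fuel
  induction fuel with
  | zero =>
    intro l d entry pos S ph hlen hE hP hph
    have hl : l = [] := by cases l <;> simp_all
    subst hl
    exact ⟨fun k h => h, ⟨[], rfl, fun hne => absurd rfl hne⟩,
      fun _ => ⟨_, _, rfl⟩, fun hne => absurd rfl hne⟩
  | succ f ih =>
    intro l d entry pos S ph hlen hE hP hph
    match l with
    | [] =>
      exact ⟨fun k h => h, ⟨[], rfl, fun hne => absurd rfl hne⟩,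
        fun _ => ⟨_, _, rfl⟩, fun hne => absurd rfl hne⟩
    | c :: rest =>
      have hlen' : rest.length ≤ f := by simpa using hlen
      cases hoffs : offsB c with
      | some off =>
        obtain ⟨dr, dc⟩ := off
        obtain ⟨hc1, hc2, hc3⟩ := offsB_ne hoffs
        obtain ⟨dp, hdp⟩ := Option.isSome_iff_exists.mp hP
        have hda := dirA_offsB hoffs
        have hB : parseB (f + 1) (c :: rest) d entry pos
            = parseB f rest
                (d.insert (pos.1 + dr, pos.2 + dc)
                  (match d.get? (pos.1 + dr, pos.2 + dc) with
                   | none => d.getD pos 0 + 1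
                   | some old => if d.getD pos 0 + 1 < old then d.getD pos 0 + 1 else old))
                entry (pos.1 + dr, pos.2 + dc) := by
          simp only [parseB, hoffs]
        set nxt := (pos.1 + dr, pos.2 + dc) with hnxtdef
        set vB := (match d.get? nxt with
                   | none => d.getD pos 0 + 1
                   | some old => if d.getD pos 0 + 1 < old then d.getD pos 0 + 1 else old) with hvdef
        have hgd : d.getD pos 0 = dp := by
          rw [PySem.Dict.getD_eq_get?_getD, hdp]; rfl
        have hvA : (match d.get? nxt with
                    | none => dp + 1
                    | some v => min v (dp + 1)) = vB := by
          rw [hvdef, hgd]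
          cases hgn : d.get? nxt with
          | none => rfl
          | some v => simp only [min_def]; split_ifs <;> omega
        have hstep : stepA (some (d, (if ph then S else entry :: S), pos)) c
            = some (d.insert nxt vB, (if ph then S else entry :: S), nxt) := by
          simp only [stepA, hda, hdp, ← hvA]
          rw [hnxtdef]
        have hE' : ((d.insert nxt vB).get? entry).isSome := by
          rw [PySem.Dict.get?_insert]; split
          · simp
          · exact hE
        have hP' : ((d.insert nxt vB).get? nxt).isSome := by
          simp [PySem.Dict.get?_insert_self]
        have hph' : ph = true → StrictL rest := fun hp => strictL_cons (hph hp) hc1 hc2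
        obtain ⟨m, ⟨pre', hsp, hb⟩, hC1', hC2'⟩ := ih rest (d.insert nxt vB) entry nxt S ph hlen' hE' hP' hph'
        refine ⟨?_, ⟨c :: pre', ?_, ?_⟩, ?_, ?_⟩
        · intro k hk
          rw [hB]
          refine m k ?_
          rw [PySem.Dict.get?_insert]; split
          · simp
          · exact hk
        · rw [hB, List.cons_append]; exact congrArg _ hsp
        · intro hne; rw [hB] at hne
          have := hb hne
          simp [hc1, hc2, this]
        · intro hnil; rw [hB] at hnil ⊢
          obtain ⟨stk, at', hf⟩ := hC1' hnil
          exact ⟨stk, at', by rw [List.foldl_cons, hstep]; exact hf⟩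
        · intro hne; rw [hB] at hne ⊢
          obtain ⟨hphf, hf⟩ := hC2' hne
          exact ⟨hphf, by rw [List.foldl_cons, hstep]; exact hf⟩
      | none =>
        by_cases h1 : c = '('
        · subst h1
          have hB : parseB (f + 1) ('(' :: rest) d entry pos
              = parseB f (parseB f rest d pos pos).1 (parseB f rest d pos pos).2 entry pos := rfl
          have hstep : stepA (some (d, (if ph then S else entry :: S), pos)) '('
              = some (d, pos :: (if ph then S else entry :: S), pos) := by
            simp [stepA, dirA]
          obtain ⟨m1, ⟨pre1, hsp1, hb1⟩, hC11, hC21⟩ :=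
            ih rest d pos pos (if ph then S else entry :: S) false hlen' hP hP (by simp)
          have hlen1 : (parseB f rest d pos pos).1.length ≤ f :=
            le_trans (parseB_len f rest d pos pos hlen') (le_trans (by cases rest <;> simp) hlen')
          by_cases hre : (parseB f rest d pos pos).1 = []
          · have hnil2 : parseB f (parseB f rest d pos pos).1 (parseB f rest d pos pos).2 entry pos
                = ([], (parseB f rest d pos pos).2) := by
              rw [hre]; exact parseB_nil _ _ _ _
            refine ⟨?_, ⟨'(' :: rest, ?_, ?_⟩, ?_, ?_⟩
            · intro k hk; rw [hB, hnil2]; exact m1 k hk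
            · rw [hB, hnil2]; simp
            · intro hne; rw [hB, hnil2] at hne; exact absurd rfl hne
            · intro _; rw [hB, hnil2]
              obtain ⟨stk, at', hf⟩ := hC11 hre
              refine ⟨stk, at', ?_⟩
              rw [List.foldl_cons, hstep]
              exact hf
            · intro hne; rw [hB, hnil2] at hne; exact absurd rfl hne
          · obtain ⟨-, hfold1⟩ := hC21 hre
            have hph1 : ph = true → StrictL (parseB f rest d pos pos).1 := by
              intro hp
              have hstrict := hph hp
              rw [hsp1] at hstrict
              have hx : ('(' :: pre1) ++ (parseB f rest d pos pos).1
                  = '(' :: (pre1 ++ (parseB f rest d pos pos).1) := by simp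
              rw [← hx] at hstrict
              refine strictL_shift hstrict ?_
              simp [hb1 hre]
            obtain ⟨m2, ⟨pre2, hsp2, hb2⟩, hC12, hC22⟩ :=
              ih (parseB f rest d pos pos).1 (parseB f rest d pos pos).2 entry pos S ph hlen1
                (m1 _ hE) (m1 _ hP) hph1
            refine ⟨?_, ⟨'(' :: (pre1 ++ pre2), ?_, ?_⟩, ?_, ?_⟩
            · intro k hk; rw [hB]; exact m2 k (m1 k hk)
            · rw [hB]; simp only [List.cons_append, List.append_assoc]
              rw [← hsp2, ← hsp1]
            · intro hne; rw [hB] at hne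
              have hx2 := hb2 hne
              have hx1 := hb1 (by intro h0; rw [h0, parseB_nil] at hne; exact hne rfl)
              simp only [List.count_cons, List.count_append,
                show (('(' : Char) == '(') = true from rfl,
                show (('(' : Char) == ')') = false from rfl]
              simp only [if_true, Bool.false_eq_true, if_false]
              omega
            · intro hnil; rw [hB] at hnil ⊢
              obtain ⟨stk, at', hf2⟩ := hC12 hnil
              refine ⟨stk, at', ?_⟩
              rw [List.foldl_cons, hstep]
              have hfold1' : rest.foldl stepA (some (d, pos :: (if ph then S else entry :: S), pos))
                  = (parseB f rest d pos pos).1.foldl stepA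
                      (some ((parseB f rest d pos pos).2, (if ph then S else entry :: S), pos)) :=
                hfold1
              rw [hfold1']
              exact hf2
            · intro hne; rw [hB] at hne ⊢
              obtain ⟨hph2, hf2⟩ := hC22 hne
              refine ⟨hph2, ?_⟩
              rw [List.foldl_cons, hstep]
              have hfold1' : rest.foldl stepA (some (d, pos :: (if ph then S else entry :: S), pos))
                  = (parseB f rest d pos pos).1.foldl stepA
                      (some ((parseB f rest d pos pos).2, (if ph then S else entry :: S), pos)) :=
                hfold1
              rw [hfold1']
              exact hf2
        · by_cases h2 : c = '|'
          · subst h2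
            cases ph with
            | true =>
              exfalso
              have := hph rfl 0 (by simp) (by simp)
              simp at this
            | false =>
              have hB : parseB (f + 1) ('|' :: rest) d entry pos = parseB f rest d entry entry := rfl
              have hstep : stepA (some (d, entry :: S, pos)) '|' = some (d, entry :: S, entry) := by
                simp [stepA, dirA]
              obtain ⟨m, ⟨pre', hsp, hb⟩, hC1', hC2'⟩ := ih rest d entry entry S false hlen' hE hE (by simp)
              refine ⟨?_, ⟨'|' :: pre', ?_, ?_⟩, ?_, ?_⟩
              · intro k hk; rw [hB]; exact m k hk
              · rw [hB, List.cons_append]; exact congrArg _ hsp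
              · intro hne; rw [hB] at hne
                have := hb hne
                simp [this]
              · intro hnil; rw [hB] at hnil ⊢
                obtain ⟨stk, at', hf⟩ := hC1' hnil
                exact ⟨stk, at', hf⟩
              · intro hne; rw [hB] at hne ⊢
                obtain ⟨hphf, hf⟩ := hC2' hne
                exact ⟨hphf, hf⟩
          · by_cases h3 : c = ')'
            · subst h3
              cases ph with
              | true =>
                exfalso
                have := hph rfl 0 (by simp) (by simp)
                simp at this
              | false =>
                have hB : parseB (f + 1) (')' :: rest) d entry pos = (rest, d) := rfl
                have hstep : stepA (some (d, entry :: S, pos)) ')' = some (d, S, entry) := by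
                  simp [stepA, dirA]
                refine ⟨?_, ⟨[')'], ?_, ?_⟩, ?_, ?_⟩
                · intro k hk; rw [hB]; exact hk
                · rw [hB]; rfl
                · intro _; simp
                · intro hnil; rw [hB] at hnil ⊢
                  have hre : rest = [] := hnil
                  subst hre
                  exact ⟨S, entry, rfl⟩
                · intro hne; rw [hB] at hne ⊢
                  exact ⟨rfl, rfl⟩
            · have hB : parseB (f + 1) (c :: rest) d entry pos = parseB f rest d entry pos := by
                show (match offsB c with
                  | some (dr, dc) =>
                    parseB f rest
                      (d.insert (pos.1 + dr, pos.2 + dc)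
                        (match d.get? (pos.1 + dr, pos.2 + dc) with
                         | none => d.getD pos 0 + 1
                         | some old => if d.getD pos 0 + 1 < old then d.getD pos 0 + 1 else old))
                      entry (pos.1 + dr, pos.2 + dc)
                  | none =>
                    if c = '(' then
                      parseB f (parseB f rest d pos pos).1 (parseB f rest d pos pos).2 entry pos
                    else if c = '|' then parseB f rest d entry entry
                    else if c = ')' then (rest, d)
                    else parseB f rest d entry pos) = parseB f rest d entry pos
                rw [hoffs]
                simp [h1, h2, h3]
              have hdan : dirA c = none := (dirA_none_iff c).mpr hoffs
              have hstep : stepA (some (d, (if ph then S else entry :: S), pos)) c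
                  = some (d, (if ph then S else entry :: S), pos) := by
                simp [stepA, hdan, h1, h2, h3]
              have hph' : ph = true → StrictL rest := fun hp => strictL_cons (hph hp) h1 h3
              obtain ⟨m, ⟨pre', hsp, hb⟩, hC1', hC2'⟩ := ih rest d entry pos S ph hlen' hE hP hph'
              refine ⟨?_, ⟨c :: pre', ?_, ?_⟩, ?_, ?_⟩
              · intro k hk; rw [hB]; exact m k hk
              · rw [hB, List.cons_append]; exact congrArg _ hsp
              · intro hne; rw [hB] at hne
                have := hb hne
                simp [h1, h3, this]
              · intro hnil; rw [hB] at hnil ⊢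
                obtain ⟨stk, at', hf⟩ := hC1' hnil
                exact ⟨stk, at', by rw [List.foldl_cons, hstep]; exact hf⟩
              · intro hne; rw [hB] at hne ⊢
                obtain ⟨hphf, hf⟩ := hC2' hne
                exact ⟨hphf, by rw [List.foldl_cons, hstep]; exact hf⟩

theorem topB_sim (fuel : Nat) (l : List Char) (d : PySem.Dict (Int × Int) Int)
    (hf : l.length ≤ fuel)
    (h0 : (d.get? ((0 : Int), (0 : Int))).isSome) (hpre : PreL l) :
    ∃ stk at', l.foldl stepA (some (d, [((0 : Int), (0 : Int))], ((0 : Int), (0 : Int)))) =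
      some (topB fuel l d, stk, at') := by
  cases fuel with
  | zero =>
    have hl : l = [] := by cases l <;> simp_all
    subst hl
    exact ⟨_, _, rfl⟩
  | succ f =>
    cases l with
    | nil => exact ⟨_, _, rfl⟩
    | cons c rest =>
      obtain ⟨m1, ⟨pre1, hsp1, hb1⟩, hC11, hC21⟩ :=
        parseB_sim (c :: rest).length (c :: rest) d ((0 : Int), (0 : Int)) ((0 : Int), (0 : Int))
          [] false (le_refl _) h0 h0 (by simp)
      set r1 := parseB (c :: rest).length (c :: rest) d ((0 : Int), (0 : Int)) ((0 : Int), (0 : Int)) with hr1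
      have htop : topB (f + 1) (c :: rest) d = topB f r1.1 r1.2 := rfl
      by_cases hre : r1.1 = []
      · obtain ⟨stk, at', hf1⟩ := hC11 hre
        refine ⟨stk, at', ?_⟩
        rw [htop, hre, topB_nil]
        exact hf1
      · obtain ⟨-, hfold1⟩ := hC21 hre
        have hstrict : StrictL r1.1 := by
          refine strictL_of_preL (pre := pre1) ?_ (hb1 hre)
          rw [← hsp1]; exact hpre
        have h0' := m1 _ h0
        obtain ⟨m2, -, hC12, hC22⟩ :=
          parseB_sim r1.1.length r1.1 r1.2 ((0 : Int), (0 : Int)) ((0 : Int), (0 : Int))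
            [] true (le_refl _) h0' h0' (fun _ => hstrict)
        have hnil2 : (parseB r1.1.length r1.1 r1.2 ((0 : Int), (0 : Int)) ((0 : Int), (0 : Int))).1 = [] := by
          by_contra hne
          exact absurd (hC22 hne).1 (by simp)
        obtain ⟨stk, at', hf2⟩ := hC12 hnil2
        refine ⟨stk, at', ?_⟩
        rw [htop]
        cases f with
        | zero =>
          exfalso
          have h1 : rest.length = 0 := by
            have h := hf
            rw [List.length_cons] at h
            omega
          have h2 := parseB_len (c :: rest).length (c :: rest) d ((0 : Int), (0 : Int)) ((0 : Int), (0 : Int)) (le_refl _)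
          rw [← hr1] at h2
          simp only [List.tail_cons] at h2
          exact hre (List.eq_nil_of_length_eq_zero (by omega))
        | succ f' =>
          obtain ⟨c', rest', hcr⟩ : ∃ c' rest', r1.1 = c' :: rest' := by
            cases hx : r1.1 with
            | nil => exact absurd hx hre
            | cons a b => exact ⟨a, b, rfl⟩
          rw [hcr] at hfold1 hnil2 hf2 ⊢
          have htop2 : topB (f' + 1) (c' :: rest') r1.2
              = topB f' (parseB (c' :: rest').length (c' :: rest') r1.2 ((0 : Int), (0 : Int)) ((0 : Int), (0 : Int))).1
                       (parseB (c' :: rest').length (c' :: rest') r1.2 ((0 : Int), (0 : Int)) ((0 : Int), (0 : Int))).2 := rfl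
          rw [htop2, hnil2, topB_nil]
          rw [show List.foldl stepA (some (d, [((0 : Int), (0 : Int))], ((0 : Int), (0 : Int)))) (c :: rest)
              = List.foldl stepA (some (r1.2, [], ((0 : Int), (0 : Int)))) (c' :: rest') from hfold1]
          exact hf2

-- ===== VERDICT (by name: the statement is the Claim_ definition above) =====
theorem room_dists_spec : Claim_equal_room_dists := by
  intro re _ hpre
  unfold Spec_room_dists room_dists room_dists_alt
  have hpre' : PreL (PySem.Str.upper re).toList := hpre
  obtain ⟨stk, at', heq⟩ := topB_sim (PySem.Str.upper re).toList.length (PySem.Str.upper re).toList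
    (PySem.Dict.ofList [(((0 : Int), (0 : Int)), (0 : Int))]) (le_refl _) (by decide) hpre'
  simp only [heq]
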